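-- pv_equiv track=rewrite | github.com/reveal2maviya/502ai | Slip11/S11A01.py | mean_end_analysis
-- ===== SOURCE A (Python) =====
-- def mean_end_analysis(start, goal):
--     operations = []
--
--     while start != goal:
--         # Find the first character that differs between start and goal
--         index = next((i for i, (s, g) in enumerate(zip(start, goal)) if s != g), None)
--
--         if index is not None:
--             # Choose an operation (e.g., replace)
--             operations.append(f"Replace '{start[index]}' at index {index} with '{goal[index]}'")
--             start = start[:index] + goal[index] + start[index + 1:]
--         else:
--             break
--
--     return operations
-- ===== SOURCE B (Python) =====
-- def mean_end_analysis(start, goal):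
--     return [f"Replace '{s}' at index {i} with '{g}'"
--             for i, (s, g) in enumerate(zip(start, goal)) if s != g]
-- ===== Notes on version B (the rewrite author's own statement) =====
-- stated objective: faster
-- what changed: Replaced the repeated while-loop (rescan for the first differing index, rebuild the string, loop again) by a single linear comprehension over zip(start, goal) emitting one replace-op per differing position.
import Mathlib
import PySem

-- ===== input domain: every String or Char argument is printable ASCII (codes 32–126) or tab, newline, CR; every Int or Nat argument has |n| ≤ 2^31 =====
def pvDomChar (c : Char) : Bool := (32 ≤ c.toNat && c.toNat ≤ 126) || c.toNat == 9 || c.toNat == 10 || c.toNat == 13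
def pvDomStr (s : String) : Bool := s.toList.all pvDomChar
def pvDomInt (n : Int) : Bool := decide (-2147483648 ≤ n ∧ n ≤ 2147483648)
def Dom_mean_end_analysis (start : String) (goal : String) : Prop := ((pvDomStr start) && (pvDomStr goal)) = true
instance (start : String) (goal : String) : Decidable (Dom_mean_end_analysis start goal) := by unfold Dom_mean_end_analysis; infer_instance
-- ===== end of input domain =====

-- B replaces A's quadratic while-loop (rescan + string rebuild per fix) by one linear pass over zip(start, goal).

-- ===== PORT A =====
-- the f-string "Replace '{s}' at index {i} with '{g}'" (shared formatting, used by both ports)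
def fmtOp (i : Nat) (c d : Char) : String :=
  "Replace '" ++ String.ofList [c] ++ "' at index " ++ toString i ++ " with '" ++ String.ofList [d] ++ "'"

-- next((i for i,(s,g) in enumerate(zip(start,goal)) if s != g), None); the pair (s,g) is returned with i
def firstDiffAux : Nat → List (Char × Char) → Option (Nat × Char × Char)
  | _, [] => none
  | i, (c, d) :: rest => if c ≠ d then some (i, c, d) else firstDiffAux (i + 1) rest

-- the while-loop of A; fuel only makes the recursion total (A's loop fixes one mismatch per
-- iteration, so start.length + 1 iterations always suffice — proved below)
def meaLoop (g : List Char) : Nat → List Char → List String → List String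
  | 0, _, acc => acc
  | fuel + 1, s, acc =>
    if s = g then acc
    else
      match firstDiffAux 0 (s.zip g) with
      | none => acc
      | some (i, c, d) =>
          meaLoop g fuel (s.take i ++ [d] ++ s.drop (i + 1)) (acc ++ [fmtOp i c d])

def mean_end_analysis (start : String) (goal : String) : List String :=
  meaLoop goal.toList (start.toList.length + 1) start.toList []

-- ===== PORT B =====
-- [f"Replace '{s}' at index {i} with '{g}'" for i,(s,g) in enumerate(zip(start,goal)) if s != g]
def altGo : Nat → List (Char × Char) → List String
  | _, [] => []
  | i, (c, d) :: rest =>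
      if c ≠ d then fmtOp i c d :: altGo (i + 1) rest else altGo (i + 1) rest

def mean_end_analysis_alt (start : String) (goal : String) : List String :=
  altGo 0 (start.toList.zip goal.toList)

-- ===== PRECONDITION & SPEC =====
def Spec_mean_end_analysis (start : String) (goal : String) (out : List String) : Prop := out = mean_end_analysis_alt start goal
instance (start : String) (goal : String) (out : List String) : Decidable (Spec_mean_end_analysis start goal out) := by unfold Spec_mean_end_analysis; infer_instance

-- ===== CLAIM (what is proved, stated in full; the proofs are below) =====
def Claim_equal_mean_end_analysis : Prop := ∀ (start : String) (goal : String), Dom_mean_end_analysis start goal → Spec_mean_end_analysis start goal (mean_end_analysis start goal)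

-- ===== LEMMAS AND PROOFS =====

-- number of mismatched positions (the loop's termination measure)
def mis (s g : List Char) : Nat := (s.zip g).countP (fun p => p.1 ≠ p.2)

theorem altGo_nil_of_none (z : List (Char × Char)) :
    ∀ k, firstDiffAux k z = none → altGo k z = [] := by
  induction z with
  | nil => intro k _; rfl
  | cons p rest ih =>
      intro k h
      obtain ⟨c, d⟩ := p
      by_cases hcd : c ≠ d
      · simp [firstDiffAux, hcd] at h
      · simp [firstDiffAux, altGo, hcd] at h ⊢
        exact ih _ h

theorem firstDiffAux_self (s : List Char) : ∀ k, firstDiffAux k (s.zip s) = none := by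
  induction s with
  | nil => intro k; rfl
  | cons a rest ih => intro k; simp [firstDiffAux, ih]

theorem step_lemma (s g : List Char) :
    ∀ k i c d, firstDiffAux k (s.zip g) = some (i, c, d) →
      k ≤ i ∧
      altGo k (s.zip g)
        = fmtOp i c d :: altGo k ((s.take (i - k) ++ [d] ++ s.drop (i - k + 1)).zip g) ∧
      (s.zip g).countP (fun p => p.1 ≠ p.2)
        = ((s.take (i - k) ++ [d] ++ s.drop (i - k + 1)).zip g).countP (fun p => p.1 ≠ p.2) + 1 := by
  induction s generalizing g with
  | nil => intro k i c d h; simp [firstDiffAux] at h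
  | cons a s' ih =>
      intro k i c d h
      cases g with
      | nil => simp [firstDiffAux] at h
      | cons b g' =>
          by_cases hab : a ≠ b
          · simp [firstDiffAux, hab] at h
            obtain ⟨hi, hc, hd⟩ := h
            subst hi; subst hc; subst hd
            refine ⟨le_rfl, ?_, ?_⟩
            · simp [altGo, hab]
            · simp [hab]
          · simp [firstDiffAux, hab] at h
            rw [not_ne_iff] at hab
            subst hab
            obtain ⟨hki, halt, hcnt⟩ := ih g' (k + 1) i c d h
            have hik : 1 ≤ i - k := by omega
            have htake : (a :: s').take (i - k) = a :: s'.take (i - (k + 1)) := by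
              obtain ⟨j, hj⟩ : ∃ j, i - k = j + 1 := ⟨i - k - 1, by omega⟩
              rw [hj]; simp [List.take_succ_cons]
              congr 1; omega
            have hdrop : (a :: s').drop (i - k + 1) = s'.drop (i - (k + 1) + 1) := by
              obtain ⟨j, hj⟩ : ∃ j, i - k = j + 1 := ⟨i - k - 1, by omega⟩
              rw [hj]; simp [List.drop_succ_cons]
              congr 1; omega
            refine ⟨by omega, ?_, ?_⟩
            · simp [altGo, htake, hdrop, halt]
            · simp [htake, hdrop] at hcnt ⊢
              omega

theorem mis_le (s g : List Char) : mis s g ≤ s.length := by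
  unfold mis
  calc (s.zip g).countP _ ≤ (s.zip g).length := List.countP_le_length
    _ ≤ s.length := by simp [List.length_zip]

theorem meaLoop_eq (g : List Char) :
    ∀ fuel s acc, mis s g < fuel →
      meaLoop g fuel s acc = acc ++ altGo 0 (s.zip g) := by
  intro fuel
  induction fuel with
  | zero => intro s acc h; omega
  | succ n ih =>
      intro s acc h
      by_cases hsg : s = g
      · subst hsg
        simp [meaLoop, altGo_nil_of_none _ 0 (firstDiffAux_self s 0)]
      · cases hfd : firstDiffAux 0 (s.zip g) with
        | none =>
            simp [meaLoop, hsg, hfd, altGo_nil_of_none _ 0 hfd]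
        | some t =>
            obtain ⟨i, c, d⟩ := t
            obtain ⟨-, halt, hcnt⟩ := step_lemma s g 0 i c d hfd
            simp only [Nat.sub_zero] at halt hcnt
            have hm : mis (s.take i ++ [d] ++ s.drop (i + 1)) g < n := by
              unfold mis at h ⊢; omega
            simp only [meaLoop, hsg, hfd]
            rw [ih _ _ hm, halt]
            simp

theorem mean_end_analysis_spec : Claim_equal_mean_end_analysis := by
  intro start goal _
  unfold Spec_mean_end_analysis mean_end_analysis mean_end_analysis_alt
  exact meaLoop_eq goal.toList (start.toList.length + 1) start.toList []
    (by have := mis_le start.toList goal.toList; omega)
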